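-- pv_equiv track=rewrite | github.com/TuturGabao/BankApplication | BankID/createId.py | _add_recurrence
-- ===== SOURCE A (Python) =====
-- def _add_recurrence(ascii_list: list[str]) -> list[str]:
--     r_list = []
--     for i,th in enumerate(ascii_list):
--         recurrence = 0
--         for i in range(i,len(ascii_list)):
--             th2 = ascii_list[i]
--             if th2 == th:
--                 recurrence+=1
--         if recurrence>=10:
--             recurrence%=10
--         if len(th)==2:
--             r_list.append(str(recurrence)+th)
--         else:
--             r_list.append(th)
--     return r_list
-- ===== SOURCE B (Python) =====
-- def _add_recurrence(ascii_list: list[str]) -> list[str]: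
--     counts = {}
--     out = []
--     for th in reversed(ascii_list):
--         c = counts.get(th, 0) + 1
--         counts[th] = c
--         out.append(str(c % 10) + th if len(th) == 2 else th)
--     out.reverse()
--     return out
-- ===== Notes on version B (the rewrite author's own statement) =====
-- stated objective: faster
-- what changed: Replaced the quadratic per-element forward scan of the suffix with a single backward pass keeping a dict of running counts per value.
import Mathlib
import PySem

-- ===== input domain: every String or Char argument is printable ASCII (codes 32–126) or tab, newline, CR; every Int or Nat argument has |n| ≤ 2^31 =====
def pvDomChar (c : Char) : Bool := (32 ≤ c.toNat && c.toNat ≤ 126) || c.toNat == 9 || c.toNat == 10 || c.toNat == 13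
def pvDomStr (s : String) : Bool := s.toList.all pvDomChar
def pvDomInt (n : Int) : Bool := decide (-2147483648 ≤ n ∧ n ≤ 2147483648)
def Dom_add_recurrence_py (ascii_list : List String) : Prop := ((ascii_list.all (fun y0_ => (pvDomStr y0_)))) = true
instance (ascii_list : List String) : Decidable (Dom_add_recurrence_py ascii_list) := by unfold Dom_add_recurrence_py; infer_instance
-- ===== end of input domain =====

-- B replaces A's quadratic per-element forward suffix scan by one backward pass with a
-- dict of running counts (objective: faster, asymptotic).

-- ===== PORT A =====
-- loop body of A's 'for i,th in enumerate(ascii_list)'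
def pvStepA (ascii_list : List String) (r_list : List String) (p : Int × String) : List String :=
  let th := p.2
  -- inner loop 'for i in range(i, len(ascii_list))'; indices are always in range,
  -- so pyGetD with default "" is exact here
  let recurrence : Int :=
    (PySem.List.pyRange p.1 (PySem.List.len ascii_list) 1).foldl
      (fun recurrence j =>
        if PySem.List.pyGetD ascii_list j "" == th then recurrence + 1 else recurrence) 0
  let recurrence := if recurrence ≥ 10 then PySem.Int.mod recurrence 10 else recurrence
  if PySem.Str.len th == 2 then r_list ++ [PySem.Int.toStr recurrence ++ th]
  else r_list ++ [th]

def add_recurrence_py (ascii_list : List String) : List String :=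
  (PySem.List.enumerate ascii_list).foldl (pvStepA ascii_list) []

-- ===== PORT B =====
-- loop body of B's 'for th in reversed(ascii_list)'
def pvStepB (st : PySem.Dict String Int × List String) (th : String) :
    PySem.Dict String Int × List String :=
  let c := st.1.getD th 0 + 1
  (st.1.insert th c,
   st.2 ++ [if PySem.Str.len th == 2 then PySem.Int.toStr (PySem.Int.mod c 10) ++ th else th])

def add_recurrence_py_alt (ascii_list : List String) : List String :=
  (ascii_list.reverse.foldl pvStepB (PySem.Dict.empty, [])).2.reverse

-- ===== PRECONDITION & SPEC =====
def Spec_add_recurrence_py (ascii_list : List String) (out : List String) : Prop := out = add_recurrence_py_alt ascii_list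
instance (ascii_list : List String) (out : List String) : Decidable (Spec_add_recurrence_py ascii_list out) := by unfold Spec_add_recurrence_py; infer_instance

-- ===== CLAIM (what is proved, stated in full; the proofs are below) =====
def Claim_equal_add_recurrence_py : Prop := ∀ (ascii_list : List String), Dom_add_recurrence_py ascii_list → Spec_add_recurrence_py ascii_list (add_recurrence_py ascii_list)

-- ===== LEMMAS AND PROOFS =====

-- the per-element output, in B's (mod) form; for counts ≥ 1 it coincides with A's conditional form
def pvOut (c : Int) (th : String) : String :=
  if PySem.Str.len th == 2 then PySem.Int.toStr (PySem.Int.mod c 10) ++ th else th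

-- reference function: element i is pvOut (count of xs[i] in the suffix from i) xs[i]
def pvRef : List String → List String
  | [] => []
  | th :: rest => pvOut ((th :: rest).count th : Int) th :: pvRef rest

lemma pvOut_condForm (c : Int) (hc : 1 ≤ c) (th : String) :
    (if PySem.Str.len th == 2
      then PySem.Int.toStr (if c ≥ 10 then PySem.Int.mod c 10 else c) ++ th else th)
    = pvOut c th := by
  unfold pvOut
  have hm : PySem.Int.mod c 10 = c % 10 := PySem.Int.mod_eq_emod_of_pos (by omega)
  by_cases h : c ≥ 10
  · simp [h]
  · have hcc : c % 10 = c := Int.emod_eq_of_lt (by omega) (by omega)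
    simp [h, hcc]

lemma stepA_eval (pre : List String) (th : String) (rest acc : List String) :
    pvStepA (pre ++ th :: rest) acc ((pre.length : Int), th)
      = acc ++ [pvOut ((th :: rest).count th : Int) th] := by
  unfold pvStepA
  have hinner : (PySem.List.pyRange ((pre.length : Int)) (PySem.List.len (pre ++ th :: rest)) 1).foldl
      (fun recurrence j =>
        if PySem.List.pyGetD (pre ++ th :: rest) j "" == th then recurrence + 1 else recurrence) 0
      = ((th :: rest).count th : Int) := by
    rw [PySem.List.foldl_pyRange_pyGetD (pre ++ th :: rest) ""
          (fun acc x => if x == th then acc + 1 else acc) 0 (by positivity),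
        Int.toNat_natCast, List.drop_left, PySem.List.foldl_beq_add_one]
    simp
  simp only [hinner]
  have hcount : (1 : Int) ≤ ((th :: rest).count th : Int) := by
    have : 0 < (th :: rest).count th := by simp
    exact_mod_cast this
  rw [← pvOut_condForm _ hcount th]
  split <;> rfl

lemma A_eq_ref (xs : List String) : ∀ (pre acc : List String),
    (PySem.List.enumerate xs (pre.length : Int)).foldl (pvStepA (pre ++ xs)) acc
      = acc ++ pvRef xs := by
  induction xs with
  | nil => intro pre acc; simp [PySem.List.enumerate, pvRef]
  | cons th rest ih =>
    intro pre acc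
    rw [PySem.List.enumerate_cons, List.foldl_cons, stepA_eval pre th rest acc]
    have hpre : ((pre.length : Int) + 1) = (((pre ++ [th]).length : Int)) := by simp
    have hlist : pre ++ th :: rest = (pre ++ [th]) ++ rest := by simp
    rw [hpre, hlist, ih (pre ++ [th])]
    simp [pvRef]

lemma B_eq_ref (xs : List String) :
    (xs.foldr (fun x y => pvStepB y x) (PySem.Dict.empty, [])).2 = (pvRef xs).reverse ∧
    ∀ v, (xs.foldr (fun x y => pvStepB y x) (PySem.Dict.empty, [])).1.getD v 0
            = (xs.count v : Int) := by
  induction xs with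
  | nil => constructor <;> simp [pvRef, PySem.Dict.getD, PySem.Dict.empty, PySem.Dict.get?]
  | cons th rest ih =>
    obtain ⟨hout, hd⟩ := ih
    simp only [List.foldr_cons]
    set R := List.foldr (fun x y => pvStepB y x) (PySem.Dict.empty, ([] : List String)) rest with hR
    have hc : ((rest.count th : Int) + 1) = (((th :: rest).count th : Int)) := by
      simp
    constructor
    · simp only [pvStepB]
      rw [hout, hd, hc]
      simp [pvRef, pvOut]
    · intro v
      simp only [pvStepB]
      rw [PySem.Dict.getD_insert]
      by_cases hv : v = th
      · subst hv
        rw [if_pos rfl, hd, hc]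
      · rw [if_neg hv, hd]
        simp [Ne.symm hv]

-- ===== VERDICT (by name: the statement is the Claim_ definition above) =====
theorem add_recurrence_py_spec : Claim_equal_add_recurrence_py := by
  intro xs _
  unfold Spec_add_recurrence_py add_recurrence_py add_recurrence_py_alt
  rw [List.foldl_reverse]
  have hA := A_eq_ref xs [] []
  simp only [List.nil_append, List.length_nil, Nat.cast_zero] at hA
  rw [hA, (B_eq_ref xs).1, List.reverse_reverse]
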